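-- pv_equiv track=rewrite | github.com/mikerosillo/python | Q.py | legalize
-- ===== SOURCE A (Python) =====
-- def legalize(past):
--     row = [0 for i in range(8)]
--     for p_row in range(len(past)):
--         for i in range(len(past[p_row])):
--             if past[p_row][i] == "Q":
--                 row[i] = 1
--                 if i - (len(past) - p_row) >= 0:
--                     row[i - (len(past) - p_row)] = 1
--                 if i + (len(past) - p_row) <= 7:
--                     row[i + (len(past) - p_row)] = 1
--     return row
-- ===== SOURCE B (Python) =====
-- def legalize(past):
--     n = len(past)
--     queens = [(c, n - p) for p, r in enumerate(past) for c, s in enumerate(r) if s == "Q"]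
--     return [1 if any(c == x or c - d == x or c + d == x for (c, d) in queens) else 0
--             for x in range(8)]
-- ===== Notes on version B (the rewrite author's own statement) =====
-- stated objective: alternative
-- what changed: Instead of mutating a row by pushing marks outward from each queen (with boundary guards), B collects the queens once as (column, distance) pairs and builds the output by testing, for each target column 0..7, whether any queen attacks it straight or diagonally.
import Mathlib
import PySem

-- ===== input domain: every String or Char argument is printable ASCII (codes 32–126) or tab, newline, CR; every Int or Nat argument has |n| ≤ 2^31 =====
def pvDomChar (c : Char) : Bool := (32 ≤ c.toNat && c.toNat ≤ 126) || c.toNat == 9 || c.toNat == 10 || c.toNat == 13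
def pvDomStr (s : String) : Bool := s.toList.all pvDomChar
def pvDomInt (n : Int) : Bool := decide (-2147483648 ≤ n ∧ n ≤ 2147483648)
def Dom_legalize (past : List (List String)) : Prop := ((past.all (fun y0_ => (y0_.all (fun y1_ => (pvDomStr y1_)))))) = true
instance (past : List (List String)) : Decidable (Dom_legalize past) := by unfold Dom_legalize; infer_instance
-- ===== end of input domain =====

-- B builds the row by testing each target column against a collected queen list instead of
-- pushing marks from each queen into a mutable row (alternative decomposition, same cost).


-- ===== PORT A =====
-- the three assignments of A's loop body: row[i]=1 and the two guarded diagonal marks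
def pvMarkLo (row : List Int) (c d : Int) : List Int :=
  if c - d ≥ 0 then PySem.List.pySetD row (c - d) 1 else row
def pvMark (row : List Int) (c d : Int) : List Int :=
  if c + d ≤ 7 then PySem.List.pySetD (pvMarkLo (PySem.List.pySetD row c 1) c d) (c + d) 1
  else pvMarkLo (PySem.List.pySetD row c 1) c d

def legalize (past : List (List String)) : List Int :=
  (PySem.List.pyRange 0 (PySem.List.len past) 1).foldl (fun row p_row =>
    (PySem.List.pyRange 0 (PySem.List.len (PySem.List.pyGetD past p_row [])) 1).foldl
      (fun row i =>
        if PySem.List.pyGetD (PySem.List.pyGetD past p_row []) i "" = "Q" then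
          pvMark row i (PySem.List.len past - p_row)
        else row)
      row)
    ((PySem.List.pyRange 0 8 1).map (fun _ => (0 : Int)))

-- ===== PORT B =====
def legalize_alt (past : List (List String)) : List Int :=
  let n : Int := PySem.List.len past
  let queens : List (Int × Int) :=
    (PySem.List.enumerate past 0).flatMap (fun pr =>
      (PySem.List.enumerate pr.2 0).filterMap (fun cs =>
        if cs.2 = "Q" then some (cs.1, n - pr.1) else none))
  (PySem.List.pyRange 0 8 1).map (fun x =>
    if queens.any (fun cd =>
        decide (cd.1 = x) || decide (cd.1 - cd.2 = x) || decide (cd.1 + cd.2 = x))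
    then (1 : Int) else 0)

-- ===== PRECONDITION & SPEC =====
-- Pre_ excludes exactly the inputs where A raises IndexError: a "Q" at index ≥ 8 in some past row.
def Pre_legalize (past : List (List String)) : Prop :=
  ∀ r ∈ past, "Q" ∉ r.drop 8
instance (past : List (List String)) : Decidable (Pre_legalize past) := by
  unfold Pre_legalize; infer_instance

def pvWitness_legalize : List (List String) :=
  [["Q", ".", ".", ".", ".", ".", ".", "."], [".", ".", "Q"]]

def Spec_legalize (past : List (List String)) (out : List Int) : Prop := out = legalize_alt past
instance (past : List (List String)) (out : List Int) : Decidable (Spec_legalize past out) := by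
  unfold Spec_legalize; infer_instance

-- ===== CLAIM (what is proved, stated in full; the proofs are below) =====
def Claim_equal_legalize : Prop :=
  ∀ (past : List (List String)), Dom_legalize past → Pre_legalize past →
    Spec_legalize past (legalize past)

-- ===== LEMMAS AND PROOFS =====

-- the row as a function of the set of columns already attacked
def pvRowOf (P : Int → Bool) : List Int :=
  (PySem.List.pyRange 0 8 1).map (fun x => if P x then 1 else 0)

def pvAtt (qs : List (Int × Int)) (x : Int) : Bool :=
  qs.any (fun cd => decide (cd.1 = x) || decide (cd.1 - cd.2 = x) || decide (cd.1 + cd.2 = x))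

theorem pvRowOf_congr {P Q : Int → Bool} (h : ∀ x, P x = Q x) : pvRowOf P = pvRowOf Q := by
  unfold pvRowOf; exact List.map_congr_left (fun x _ => by rw [h])

theorem pvRowOf_getElem? (P : Int → Bool) (k : Nat) :
    (pvRowOf P)[k]? = if k < 8 then some (if P k then 1 else 0) else none := by
  unfold pvRowOf
  rw [List.getElem?_map, PySem.List.getElem?_pyRange_one]
  split_ifs <;> simp_all

theorem pvMark_rowOf (P : Int → Bool) (c d : Int) (hc0 : 0 ≤ c) (hc7 : c ≤ 7) (hd : 0 < d) :
    pvMark (pvRowOf P) c d =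
      pvRowOf (fun x => (decide (c = x) || decide (c - d = x) || decide (c + d = x)) || P x) := by
  have hset : ∀ (row : List Int) (i : Int), 0 ≤ i →
      PySem.List.pySetD row i 1 = row.set i.toNat 1 :=
    fun row i hi => PySem.List.pySetD_of_nonneg row 1 hi
  have hlen : (pvRowOf P).length = 8 := by
    simp [pvRowOf, PySem.List.length_pyRange_one]
  apply List.ext_getElem?
  intro k
  unfold pvMark pvMarkLo
  rw [hset _ _ hc0]
  split_ifs with h3 h4 h4 <;>
    first
    | (rw [hset _ _ (by omega), hset _ _ (by omega)]
       simp only [List.getElem?_set, pvRowOf_getElem?, hlen]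
       split_ifs <;> simp_all <;> omega)
    | (rw [hset _ _ (by omega)]
       simp only [List.getElem?_set, pvRowOf_getElem?, hlen]
       split_ifs <;> simp_all <;> omega)
    | (simp only [List.getElem?_set, pvRowOf_getElem?, hlen]
       split_ifs <;> simp_all <;> omega)

theorem pvInner (r : List String) (d : Int) (hd : 0 < d) :
    ∀ (s : Int), 0 ≤ s →
      (∀ k : Nat, (hk : k < r.length) → r[k] = "Q" → s + k ≤ 7) →
      ∀ P : Int → Bool,
        (PySem.List.enumerate r s).foldl
            (fun row cs => if cs.2 = "Q" then pvMark row cs.1 d else row) (pvRowOf P)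
          = pvRowOf (fun x =>
              pvAtt ((PySem.List.enumerate r s).filterMap
                (fun cs => if cs.2 = "Q" then some (cs.1, d) else none)) x || P x) := by
  induction r with
  | nil => intro s _ _ P; simp [PySem.List.enumerate_nil, pvAtt]
  | cons a r ih =>
    intro s hs hQ P
    rw [PySem.List.enumerate_cons]
    simp only [List.foldl_cons, List.filterMap_cons]
    by_cases ha : a = "Q"
    · have h0 : s + (0 : Nat) ≤ 7 := hQ 0 (by simp) (by simpa using ha)
      simp only [if_pos ha]
      rw [pvMark_rowOf P s d hs (by omega) hd]
      rw [ih (s + 1) (by omega)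
        (fun k hk h => by have := hQ (k + 1) (by simpa using hk) (by simpa using h); push_cast at *; omega)]
      apply pvRowOf_congr
      intro x
      simp [pvAtt, Bool.or_assoc, Bool.or_comm, Bool.or_left_comm]
    · simp only [if_neg ha]
      exact ih (s + 1) (by omega)
        (fun k hk h => by have := hQ (k + 1) (by simpa using hk) (by simpa using h); push_cast at *; omega) P

theorem pvOuter (ps : List (List String)) (n : Int) :
    ∀ (s : Int), 0 ≤ s → s + ps.length ≤ n →
      (∀ r ∈ ps, ∀ k : Nat, (hk : k < r.length) → r[k] = "Q" → (k : Int) ≤ 7) →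
      ∀ P : Int → Bool,
        (PySem.List.enumerate ps s).foldl
            (fun row pr =>
              (PySem.List.enumerate pr.2 0).foldl
                (fun row cs => if cs.2 = "Q" then pvMark row cs.1 (n - pr.1) else row) row)
            (pvRowOf P)
          = pvRowOf (fun x =>
              pvAtt ((PySem.List.enumerate ps s).flatMap
                (fun pr => (PySem.List.enumerate pr.2 0).filterMap
                  (fun cs => if cs.2 = "Q" then some (cs.1, n - pr.1) else none))) x || P x) := by
  induction ps with
  | nil => intro s _ _ _ P; simp [PySem.List.enumerate_nil, pvAtt]
  | cons r ps ih =>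
    intro s hs hn hQ P
    rw [PySem.List.enumerate_cons]
    simp only [List.foldl_cons, List.flatMap_cons]
    rw [pvInner r (n - s) (by simp at hn; omega) 0 le_rfl
      (fun k hk h => by have := hQ r (by simp) k hk h; omega) P]
    rw [ih (s + 1) (by omega) (by simp at hn ⊢; omega)
      (fun r' hr' => hQ r' (by simp [hr']))]
    apply pvRowOf_congr
    intro x
    simp [pvAtt, List.any_append, Bool.or_assoc, Bool.or_comm, Bool.or_left_comm]

-- ===== VERDICT (by name: the statement is the Claim_ definition above) =====
theorem legalize_spec : Claim_equal_legalize := by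
  intro past _ hpre
  unfold Spec_legalize legalize legalize_alt
  have hq : ∀ r ∈ past, ∀ k : Nat, (hk : k < r.length) → r[k] = "Q" → (k : Int) ≤ 7 := by
    intro r hr k hk h
    by_contra hgt
    exact hpre r hr (by
      refine List.mem_iff_getElem.mpr ⟨k - 8, by simp; omega, ?_⟩
      rw [List.getElem_drop]
      have : 8 + (k - 8) = k := by omega
      simp [this, h])
  have hrw : PySem.List.enumerate past 0 =
      (PySem.List.pyRange 0 (PySem.List.len past) 1).map
        (fun j => (j, PySem.List.pyGetD past j [])) :=
    PySem.List.enumerate_eq_map_pyRange past []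
  have hrw2 : ∀ r : List String, PySem.List.enumerate r 0 =
      (PySem.List.pyRange 0 (PySem.List.len r) 1).map
        (fun i => (i, PySem.List.pyGetD r i "")) :=
    fun r => PySem.List.enumerate_eq_map_pyRange r ""
  have key := pvOuter past (PySem.List.len past) 0 le_rfl (by simp) hq (fun _ => false)
  rw [hrw] at key
  simp only [List.foldl_map, List.flatMap_map, hrw2, List.filterMap_map, Function.comp] at key
  have hinit : (PySem.List.pyRange 0 8 1).map (fun _ => (0 : Int)) = pvRowOf (fun _ => false) := by
    simp [pvRowOf]
  rw [hinit, key, hrw]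
  simp only [List.flatMap_map, hrw2, List.filterMap_map, Function.comp]
  unfold pvRowOf pvAtt
  simp only [Bool.or_false]
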